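-- pv_equiv track=rewrite | github.com/Lehnart/coding-challenges | euler/61.py | dict_from_two_first_letters
-- ===== SOURCE A (Python) =====
-- def dict_from_two_first_letters(list_n):
--     list_str = [str(n) for n in list_n]
--     dict = {}
--     for n_str in list_str:
--         if n_str[:2] not in dict:
--             dict[n_str[:2]] = []
--         dict[n_str[:2]].append(int(n_str))
--     return dict
-- ===== SOURCE B (Python) =====
-- def dict_from_two_first_letters(list_n):
--     # Two-pass grouping: ordered-dedup the two-char prefixes first, then one
--     # filtering pass per prefix, instead of A's single-pass dict insertion.
--     list_str = [str(n) for n in list_n]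
--     prefixes = dict.fromkeys(s[:2] for s in list_str)
--     return {p: [int(s) for s in list_str if s[:2] == p] for p in prefixes}
-- ===== Notes on version B (the rewrite author's own statement) =====
-- stated objective: alternative
-- what changed: Replaces A's single-pass dict insertion (setdefault-to-[] then append per element) with a two-pass scheme: ordered-dedup the two-character prefixes via dict.fromkeys, then build each group with one filtering pass over the stringified list.
import Mathlib
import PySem

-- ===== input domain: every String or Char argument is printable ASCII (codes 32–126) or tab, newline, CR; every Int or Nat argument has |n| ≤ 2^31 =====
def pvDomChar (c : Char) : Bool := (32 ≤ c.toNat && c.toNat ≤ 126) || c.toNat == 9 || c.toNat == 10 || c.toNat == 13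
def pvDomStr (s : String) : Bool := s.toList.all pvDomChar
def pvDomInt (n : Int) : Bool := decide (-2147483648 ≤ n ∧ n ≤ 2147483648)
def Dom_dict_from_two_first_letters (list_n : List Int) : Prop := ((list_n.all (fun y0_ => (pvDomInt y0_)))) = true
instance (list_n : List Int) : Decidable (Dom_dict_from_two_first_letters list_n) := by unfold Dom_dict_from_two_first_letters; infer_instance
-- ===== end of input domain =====

-- B replaces A's single-pass dict insertion by an ordered dedup of the two-char
-- prefixes followed by one filtering pass per prefix (alternative decomposition).

-- ===== PORT A =====
def dict_from_two_first_letters (list_n : List Int) : List (String × List Int) :=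
  let list_str := list_n.map PySem.Int.toStr
  let d := list_str.foldl (fun d n_str =>
    let k := PySem.Str.slice n_str none (some 2)
    let d := if d.contains k then d else d.insert k ([] : List Int)
    -- dict[k].append(int(n_str)); int(str(n)) always parses, so '.getD 0' is exact here
    d.modify k [] (fun l => l ++ [(PySem.Int.ofStr? n_str).getD 0]))
    PySem.Dict.empty
  d.items

-- ===== PORT B =====
def dict_from_two_first_letters_alt (list_n : List Int) : List (String × List Int) :=
  let list_str := list_n.map PySem.Int.toStr
  let prefixes := PySem.List.dedup (list_str.map (fun s => PySem.Str.slice s none (some 2)))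
  prefixes.map (fun p => (p,
    (list_str.filter (fun s => PySem.Str.slice s none (some 2) == p)).map
      (fun s => (PySem.Int.ofStr? s).getD 0)))

-- ===== PRECONDITION & SPEC =====
def Spec_dict_from_two_first_letters (list_n : List Int) (out : List (String × List Int)) : Prop := out = dict_from_two_first_letters_alt list_n
instance (list_n : List Int) (out : List (String × List Int)) : Decidable (Spec_dict_from_two_first_letters list_n out) := by unfold Spec_dict_from_two_first_letters; infer_instance

-- ===== CLAIM (what is proved, stated in full; the proofs are below) =====
def Claim_equal_dict_from_two_first_letters : Prop := ∀ (list_n : List Int), Dom_dict_from_two_first_letters list_n → Spec_dict_from_two_first_letters list_n (dict_from_two_first_letters list_n)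

-- ===== LEMMAS AND PROOFS =====

-- abbreviations used only by the proofs
def pvKey (s : String) : String := PySem.Str.slice s none (some 2)
def pvVal (s : String) : Int := (PySem.Int.ofStr? s).getD 0

-- A's loop body ('setdefault to [] then append') is one Dict.modify
theorem pvStep_eq (d : PySem.Dict String (List Int)) (s : String) :
    (let k := PySem.Str.slice s none (some 2)
     let d' := if d.contains k then d else d.insert k ([] : List Int)
     d'.modify k [] (fun l => l ++ [(PySem.Int.ofStr? s).getD 0]))
    = d.modify (pvKey s) [] (fun l => l ++ [pvVal s]) := by
  by_cases h : d.contains (PySem.Str.slice s none (some 2)) = true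
  · simp [pvKey, pvVal, h]
  · simp only [Bool.not_eq_true] at h
    simp [pvKey, pvVal, h, PySem.Dict.modify, PySem.Dict.getD_insert_self,
      PySem.Dict.insert_insert_self, PySem.Dict.getD_of_not_contains _ _ h]

-- the main equivalence, over an arbitrary list of strings
theorem pvMain (ss : List String) :
    (ss.foldl (fun d s => d.modify (pvKey s) [] (fun l => l ++ [pvVal s]))
      PySem.Dict.empty).items
    = (PySem.List.dedup (ss.map pvKey)).map
        (fun p => (p, (ss.filter (fun s => pvKey s == p)).map pvVal)) := by
  have hnd : (ss.foldl (fun d s => d.modify (pvKey s) [] (fun l => l ++ [pvVal s]))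
      PySem.Dict.empty).keys.Nodup := by
    exact PySem.Dict.nodup_keys_foldl_modify_key ss pvKey [] (fun _ s l => l ++ [pvVal s])
      PySem.Dict.empty (by simp)
  rw [PySem.Dict.items_eq_map_keys _ hnd []]
  have hkeys : (ss.foldl (fun d s => d.modify (pvKey s) [] (fun l => l ++ [pvVal s]))
      PySem.Dict.empty).keys = PySem.List.dedup (ss.map pvKey) := by
    rw [PySem.Dict.keys_foldl_modify_key ss pvKey [] (fun _ s l => l ++ [pvVal s])]
    simp [PySem.List.dedup_eq_ofList, PySem.Set.update, PySem.Set.ofList,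
      PySem.Dict.keys_empty]
  rw [hkeys]
  apply List.map_congr_left
  intro p _
  congr 1
  have hfold : ss.foldl (fun d s => d.modify (pvKey s) [] (fun l => l ++ [pvVal s]))
      PySem.Dict.empty
      = (ss.map (fun s => (pvKey s, pvVal s))).foldl
          (fun d q => d.modify q.1 [] (fun l => l ++ [q.2])) PySem.Dict.empty := by
    rw [List.foldl_map]
  rw [hfold, PySem.Dict.getD_foldl_modify_append]
  simp [PySem.Dict.getD_empty, List.filter_map, Function.comp_def, List.map_map]

-- ===== VERDICT (by name: the statement is the Claim_ definition above) =====
theorem dict_from_two_first_letters_spec : Claim_equal_dict_from_two_first_letters := by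
  intro list_n _
  unfold Spec_dict_from_two_first_letters dict_from_two_first_letters dict_from_two_first_letters_alt
  have hstep : (fun (d : PySem.Dict String (List Int)) (n_str : String) =>
      let k := PySem.Str.slice n_str none (some 2)
      let d' := if d.contains k then d else d.insert k ([] : List Int)
      d'.modify k [] (fun l => l ++ [(PySem.Int.ofStr? n_str).getD 0]))
      = (fun d s => d.modify (pvKey s) [] (fun l => l ++ [pvVal s])) := by
    funext d s; exact pvStep_eq d s
  simp only [hstep]
  rw [pvMain]
  simp [pvKey, pvVal, Function.comp_def]
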